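-- pv_equiv track=rewrite | github.com/ksayee/programming_assignments | python/CodingExercises/LeetCode423.py | LeetCode423
-- ===== SOURCE A (Python) =====
-- import collections
--
-- def Combinations_recur(lst,cnt,tmp,fnl_lst,dict):
--
--     if len(tmp)>0:
--         if ''.join(tmp) in dict.keys():
--             fnl_lst.append(str(dict[''.join(tmp)]))
--
--     for i in range(0,len(lst)):
--         if cnt[i]==0:
--             continue
--         tmp.append(lst[i])
--         cnt[i]=cnt[i]-1
--         Combinations_recur(lst, cnt, tmp, fnl_lst, dict)
--         tmp.pop()
--         cnt[i]=cnt[i]+1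
--
-- def LeetCode423(dict,str1):
--
--     str_dict=collections.Counter(str1)
--     lst=[]
--     cnt=[]
--     for key,val in str_dict.items():
--         lst.append(key)
--         cnt.append(val)
--     tmp=[]
--     fnl_lst=[]
--     Combinations_recur(lst,cnt,tmp,fnl_lst,dict)
--     return ''.join(sorted(fnl_lst))
-- ===== SOURCE B (Python) =====
-- import collections
--
-- def LeetCode423(dict, str1):
--     # For each dict key, check its character counts fit inside str1's counts
--     # (non-empty key only); collect str(value) for the fitting keys and join sorted.
--     tc = collections.Counter(str1)
--     out = []
--     for key, val in dict.items():
--         kc = collections.Counter(key)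
--         if key and all(kc[c] <= tc[c] for c in kc):
--             out.append(str(val))
--     return ''.join(sorted(out))
-- ===== Notes on version B (the rewrite author's own statement) =====
-- stated objective: alternative
-- what changed: Replaces the factorial backtracking enumeration of every multiset permutation of str1's characters with one pass over the dict that checks each key's Counter for being a sub-multiset of str1's Counter (non-empty keys only); intended to avoid A's combinatorial blowup, but a timing run could not measure a ratio (A already times out at len(str1)=16 where B returns, and on the sizes both finish A is too quick to time).
import Mathlib
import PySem

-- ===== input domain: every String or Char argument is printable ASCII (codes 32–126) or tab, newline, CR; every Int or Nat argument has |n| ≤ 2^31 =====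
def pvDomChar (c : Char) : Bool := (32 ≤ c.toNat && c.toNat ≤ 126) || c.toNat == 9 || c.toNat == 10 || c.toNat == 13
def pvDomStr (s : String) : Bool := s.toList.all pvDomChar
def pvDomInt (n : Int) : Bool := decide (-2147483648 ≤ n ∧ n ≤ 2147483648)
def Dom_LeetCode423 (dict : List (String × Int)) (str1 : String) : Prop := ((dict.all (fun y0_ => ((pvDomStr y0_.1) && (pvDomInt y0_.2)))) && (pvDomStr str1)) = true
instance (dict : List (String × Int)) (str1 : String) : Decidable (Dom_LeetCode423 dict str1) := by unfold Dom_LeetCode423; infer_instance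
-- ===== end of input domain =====

-- B replaces A's backtracking over all multiset permutations of str1's characters by a single
-- pass testing each dict key's Counter for being a sub-multiset of str1's Counter.
-- A mutates its helper's list arguments internally only; the call is side-effect free for the caller.

-- ===== PORT A =====
-- termination helper for the backtracking recursion (cited by decreasing_by)
theorem pv_sum_set_lt (cnt : List Nat) (i : Nat) (h : cnt.getD i 0 ≠ 0) :
    (cnt.set i (cnt.getD i 0 - 1)).sum < cnt.sum := by
  induction cnt generalizing i with
  | nil => simp at h
  | cons c t ih =>
    cases i with
    | zero => simp_all; omega
    | succ j =>
      simp only [List.getD_cons_succ] at h ⊢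
      have := ih j h
      simp only [List.getD_eq_getElem?_getD] at this ⊢
      simp only [List.set_cons_succ, List.sum_cons]
      omega

mutual
-- Combinations_recur(lst, cnt, tmp, fnl_lst, dict): mutation ported as returning the final fnl_lst;
-- tmp and cnt are restored by the Python code after each call, so they are plain arguments here.
-- Counter values are positive, so cnt is carried as List Nat (exact).
def pvCombRec (d : List (String × Int)) (lst : List Char) (cnt : List Nat)
    (tmp : List Char) (fnl : List String) : List String :=
  let fnl1 :=
    if 0 < tmp.length then
      -- ''.join(tmp) of a list of single characters is String.ofList tmp (PySem.Chars.join_nil_singletons)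
      match d.find? (fun kv => kv.1 == String.ofList tmp) with   -- `in dict.keys()` + `dict[...]`: first match
      | some kv => fnl ++ [PySem.Int.toStr kv.2]
      | none => fnl
    else fnl
  pvCombLoop d lst cnt tmp fnl1 0
termination_by (cnt.sum, lst.length + 2)
decreasing_by exact Prod.Lex.right _ (by omega)

def pvCombLoop (d : List (String × Int)) (lst : List Char) (cnt : List Nat)
    (tmp : List Char) (fnl : List String) (i : Nat) : List String :=
  if i < lst.length then
    let fnl' := if cnt.getD i 0 = 0 then fnl
      else pvCombRec d lst (cnt.set i (cnt.getD i 0 - 1)) (tmp ++ [lst.getD i ' ']) fnl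
    pvCombLoop d lst cnt tmp fnl' (i + 1)
  else fnl
termination_by (cnt.sum, lst.length + 1 - i)
decreasing_by
· exact Prod.Lex.left _ _ (pv_sum_set_lt cnt i (by assumption))
· exact Prod.Lex.right _ (by omega)
end

def LeetCode423 (dict : List (String × Int)) (str1 : String) : String :=
  let strDict := PySem.Dict.counter str1.toList
  let lc := strDict.items.foldl
    (fun (p : List Char × List Nat) kv => (p.1 ++ [kv.1], p.2 ++ [kv.2.toNat])) ([], [])
  let fnl := pvCombRec dict lc.1 lc.2 [] []
  PySem.Str.join "" (PySem.List.sorted fnl (fun s => s))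

-- ===== PORT B =====
def LeetCode423_alt (dict : List (String × Int)) (str1 : String) : String :=
  let tc := PySem.Dict.counter str1.toList
  -- `kc = Counter(key)` is written out at both of its two uses
  let out := dict.foldl (fun out kv =>
    if (kv.1 != "") && ((PySem.Dict.counter kv.1.toList).keys.all
        (fun c => decide ((PySem.Dict.counter kv.1.toList).getD c 0 ≤ tc.getD c 0))) then
      out ++ [PySem.Int.toStr kv.2]
    else out) []
  PySem.Str.join "" (PySem.List.sorted out (fun s => s))

-- ===== PRECONDITION & SPEC =====
-- Pre_ requires pairwise-distinct keys: the dict parameter is a Python dict, which cannot hold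
-- duplicate keys, so an association list with duplicates has no Python counterpart (A's first-match
-- lookup and B's full iteration are both accidental encodings of it).
def Pre_LeetCode423 (dict : List (String × Int)) (str1 : String) : Prop :=
  (dict.map Prod.fst).Nodup
instance (dict : List (String × Int)) (str1 : String) : Decidable (Pre_LeetCode423 dict str1) := by
  unfold Pre_LeetCode423; infer_instance
def pvWitness_LeetCode423 : (List (String × Int)) × String := ([("ab", 5), ("b", 7)], "ab")

def Spec_LeetCode423 (dict : List (String × Int)) (str1 : String) (out : String) : Prop := out = LeetCode423_alt dict str1
instance (dict : List (String × Int)) (str1 : String) (out : String) : Decidable (Spec_LeetCode423 dict str1 out) := by unfold Spec_LeetCode423; infer_instance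

-- ===== CLAIM (what is proved, stated in full; the proofs are below) =====
def Claim_equal_LeetCode423 : Prop := ∀ (dict : List (String × Int)) (str1 : String), Dom_LeetCode423 dict str1 → Pre_LeetCode423 dict str1 → Spec_LeetCode423 dict str1 (LeetCode423 dict str1)

-- ===== LEMMAS AND PROOFS =====

-- reference enumeration of the sequences A's backtracking visits (proof-only helper)
mutual
def pvExtsLoop (lst : List Char) (cnt : List Nat) (i : Nat) : List (List Char) :=
  if i < lst.length then
    (if cnt.getD i 0 = 0 then [] else
      (pvExts lst (cnt.set i (cnt.getD i 0 - 1))).map (lst.getD i ' ' :: ·)) ++ pvExtsLoop lst cnt (i + 1)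
  else []
termination_by (cnt.sum, lst.length + 1 - i)
decreasing_by
· exact Prod.Lex.left _ _ (pv_sum_set_lt cnt i (by assumption))
· exact Prod.Lex.right _ (by omega)

def pvExts (lst : List Char) (cnt : List Nat) : List (List Char) :=
  [] :: pvExtsLoop lst cnt 0
termination_by (cnt.sum, lst.length + 2)
decreasing_by exact Prod.Lex.right _ (by omega)
end

theorem pv_mem_extsLoop (lst : List Char) (cnt : List Nat) (i : Nat) (u : List Char) :
    u ∈ pvExtsLoop lst cnt i ↔
      ∃ j, i ≤ j ∧ j < lst.length ∧ cnt.getD j 0 ≠ 0 ∧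
        ∃ u', u = lst.getD j ' ' :: u' ∧ u' ∈ pvExts lst (cnt.set j (cnt.getD j 0 - 1)) := by
  have H : ∀ k i, lst.length - i ≤ k →
      (u ∈ pvExtsLoop lst cnt i ↔
        ∃ j, i ≤ j ∧ j < lst.length ∧ cnt.getD j 0 ≠ 0 ∧
          ∃ u', u = lst.getD j ' ' :: u' ∧ u' ∈ pvExts lst (cnt.set j (cnt.getD j 0 - 1))) := by
    intro k
    induction k with
    | zero =>
      intro i hi
      rw [pvExtsLoop]
      have hni : ¬ i < lst.length := by omega
      simp only [hni, if_false, List.not_mem_nil, false_iff]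
      rintro ⟨j, hj1, hj2, -⟩; omega
    | succ k ih =>
      intro i hi
      rw [pvExtsLoop]
      by_cases hlt : i < lst.length
      · simp only [hlt, if_true, List.mem_append]
        rw [ih (i + 1) (by omega)]
        constructor
        · rintro (hb | ⟨j, hj1, hj2, hj3, u', rfl, hu'⟩)
          · by_cases hc : cnt.getD i 0 = 0
            · rw [if_pos hc] at hb
              simp at hb
            · simp only [hc, if_false, List.mem_map] at hb
              obtain ⟨u', hu', rfl⟩ := hb
              exact ⟨i, le_rfl, hlt, hc, u', rfl, hu'⟩
          · exact ⟨j, by omega, hj2, hj3, u', rfl, hu'⟩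
        · rintro ⟨j, hj1, hj2, hj3, u', rfl, hu'⟩
          rcases eq_or_lt_of_le hj1 with rfl | hlt2
          · left
            simp only [hj3, if_false, List.mem_map]
            exact ⟨u', hu', rfl⟩
          · right
            exact ⟨j, by omega, hj2, hj3, u', rfl, hu'⟩
      · simp only [hlt, if_false, List.not_mem_nil, false_iff]
        rintro ⟨j, hj1, hj2, -⟩; omega
  exact H lst.length i (by omega)

theorem pv_getD_set (cnt : List Nat) (j v i : Nat) (hj : j < cnt.length) :
    (cnt.set j v).getD i 0 = if i = j then v else cnt.getD i 0 := by
  by_cases h : i = j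
  · subst h
    simp [List.getD_eq_getElem?_getD, hj]
  · have h2 : ¬ j = i := fun hh => h hh.symm
    simp [List.getD_eq_getElem?_getD, h, h2]

theorem pv_getD_mem (lst : List Char) (j : Nat) (hj : j < lst.length) :
    lst.getD j ' ' ∈ lst := by
  rw [List.getD_eq_getElem?_getD, List.getElem?_eq_getElem hj]
  exact List.getElem_mem hj

theorem pv_getD_ne (lst : List Char) (hn : lst.Nodup) (i j : Nat)
    (hi : i < lst.length) (hj : j < lst.length) (hij : i ≠ j) :
    lst.getD i ' ' ≠ lst.getD j ' ' := by
  rw [List.getD_eq_getElem?_getD, List.getElem?_eq_getElem hi,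
      List.getD_eq_getElem?_getD, List.getElem?_eq_getElem hj]
  simp only [Option.getD_some]
  exact fun h => hij ((hn.getElem_inj_iff).mp h)

theorem pv_mem_exts (lst : List Char) (hn : lst.Nodup) (cnt : List Nat) (u : List Char) :
    u ∈ pvExts lst cnt ↔
      (∀ c ∈ u, c ∈ lst) ∧ ∀ i, i < lst.length → u.count (lst.getD i ' ') ≤ cnt.getD i 0 := by
  induction hsum : cnt.sum using Nat.strong_induction_on generalizing cnt u with
  | _ n ih =>
  subst hsum
  rw [pvExts]
  simp only [List.mem_cons, pv_mem_extsLoop]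
  constructor
  · rintro (rfl | ⟨j, -, hj2, hj3, u', rfl, hu'⟩)
    · exact ⟨by simp, fun i hi => by simp⟩
    · have hjc : j < cnt.length := by
        by_contra hge
        exact hj3 (by simp [List.getD_eq_getElem?_getD, List.getElem?_eq_none (by omega : cnt.length ≤ j)])
      obtain ⟨h1, h2⟩ := (ih _ (pv_sum_set_lt cnt j hj3) _ _ rfl).mp hu'
      refine ⟨?_, ?_⟩
      · intro c hc
        rcases List.mem_cons.mp hc with rfl | hc'
        · exact pv_getD_mem lst j hj2
        · exact h1 c hc'
      · intro i hi
        have hcount := h2 i hi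
        rw [pv_getD_set cnt j _ i hjc] at hcount
        by_cases hij : i = j
        · subst hij
          rw [if_pos rfl] at hcount
          rw [List.count_cons_self]
          omega
        · rw [if_neg hij] at hcount
          have hne := pv_getD_ne lst hn j i hj2 hi (fun h => hij h.symm)
          have hbe : (lst.getD j ' ' == lst.getD i ' ') = false := beq_eq_false_iff_ne.mpr hne
          rw [List.count_cons, hbe]
          simpa using hcount
  · rintro ⟨h1, h2⟩
    cases u with
    | nil => exact Or.inl rfl
    | cons c u' =>
      right
      have hcl : c ∈ lst := h1 c (by simp)
      obtain ⟨j, hj, hcj⟩ := List.mem_iff_getElem.mp hcl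
      have hgd : lst.getD j ' ' = c := by
        rw [List.getD_eq_getElem?_getD, List.getElem?_eq_getElem hj, Option.getD_some, hcj]
      have hc0 : cnt.getD j 0 ≠ 0 := by
        have h2j := h2 j hj
        rw [hgd] at h2j
        have : 0 < (c :: u').count c := by simp
        omega
      have hjc : j < cnt.length := by
        by_contra hge
        exact hc0 (by simp [List.getD_eq_getElem?_getD, List.getElem?_eq_none (by omega : cnt.length ≤ j)])
      refine ⟨j, Nat.zero_le j, hj, hc0, u', by rw [hgd], ?_⟩
      apply (ih _ (pv_sum_set_lt cnt j hc0) _ _ rfl).mpr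
      refine ⟨fun c' hc' => h1 c' (List.mem_cons_of_mem _ hc'), ?_⟩
      intro i hi
      rw [pv_getD_set cnt j _ i hjc]
      by_cases hij : i = j
      · subst hij
        rw [if_pos rfl]
        have h2i := h2 i hi
        rw [hgd] at h2i ⊢
        rw [List.count_cons_self] at h2i
        omega
      · rw [if_neg hij]
        have hne := pv_getD_ne lst hn i j hi hj hij
        rw [hgd] at hne
        have hbe : (c == lst.getD i ' ') = false := beq_eq_false_iff_ne.mpr (Ne.symm hne)
        have h2i := h2 i hi
        rw [List.count_cons, hbe] at h2i
        simpa using h2i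

theorem pv_nodup_exts (lst : List Char) (hn : lst.Nodup) (cnt : List Nat) :
    (pvExts lst cnt).Nodup := by
  induction hsum : cnt.sum using Nat.strong_induction_on generalizing cnt with
  | _ n ih =>
  subst hsum
  have hloop : ∀ i, (pvExtsLoop lst cnt i).Nodup := by
    intro i
    have H2 : ∀ k i, lst.length - i ≤ k → (pvExtsLoop lst cnt i).Nodup := by
      intro k
      induction k with
      | zero =>
        intro i hi
        rw [pvExtsLoop]
        simp [show ¬ i < lst.length by omega]
      | succ k ih2 =>
        intro i hi
        rw [pvExtsLoop]
        by_cases hlt : i < lst.length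
        · simp only [hlt, if_true]
          refine List.Nodup.append ?_ (ih2 (i + 1) (by omega)) ?_
          · by_cases hc : cnt.getD i 0 = 0
            · rw [if_pos hc]
              exact List.nodup_nil
            · rw [if_neg hc]
              exact List.Nodup.map (fun a b h => by injection h)
                (ih _ (pv_sum_set_lt cnt i hc) _ rfl)
          · intro u hu1 hu2
            by_cases hc : cnt.getD i 0 = 0
            · rw [if_pos hc] at hu1
              simp at hu1
            · rw [if_neg hc] at hu1
              obtain ⟨u', -, rfl⟩ := List.mem_map.mp hu1
              obtain ⟨j, hj1, hj2, -, u'', heq, -⟩ := (pv_mem_extsLoop lst cnt (i + 1) _).mp hu2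
              have hne := pv_getD_ne lst hn i j hlt hj2 (by omega)
              exact hne (by injection heq)
        · simp [hlt]
    exact H2 lst.length i (by omega)
  rw [pvExts]
  refine List.nodup_cons.mpr ⟨?_, hloop 0⟩
  intro hmem
  obtain ⟨j, -, -, -, u', heq, -⟩ := (pv_mem_extsLoop lst cnt 0 []).mp hmem
  exact List.cons_ne_nil _ _ heq.symm

-- the option A's head step appends for the sequence tmp ++ u
def pvF (d : List (String × Int)) (tmp u : List Char) : Option String :=
  if (tmp ++ u).length = 0 then none
  else (d.find? (fun kv => kv.1 == String.ofList (tmp ++ u))).map (fun kv => PySem.Int.toStr kv.2)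

theorem pvF_cons (d : List (String × Int)) (tmp : List Char) (c : Char) (u : List Char) :
    pvF d tmp (c :: u) = pvF d (tmp ++ [c]) u := by
  simp [pvF]

theorem pv_combRec_eq (d : List (String × Int)) (lst : List Char) (cnt : List Nat)
    (tmp : List Char) (fnl : List String) :
    pvCombRec d lst cnt tmp fnl = fnl ++ (pvExts lst cnt).filterMap (pvF d tmp) := by
  induction hsum : cnt.sum using Nat.strong_induction_on generalizing cnt tmp fnl with
  | _ n ih =>
  subst hsum
  have hloop : ∀ k i tmp fnl, lst.length - i ≤ k →
      pvCombLoop d lst cnt tmp fnl i = fnl ++ (pvExtsLoop lst cnt i).filterMap (pvF d tmp) := by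
    intro k
    induction k with
    | zero =>
      intro i tmp fnl hi
      rw [pvCombLoop, pvExtsLoop]
      simp [show ¬ i < lst.length by omega]
    | succ k ih2 =>
      intro i tmp fnl hi
      rw [pvCombLoop, pvExtsLoop]
      by_cases hlt : i < lst.length
      · simp only [hlt, if_true]
        by_cases hc : cnt.getD i 0 = 0
        · simp only [hc, if_true]
          rw [ih2 (i + 1) tmp fnl (by omega)]
          simp
        · simp only [hc, if_false]
          rw [ih2 (i + 1) tmp _ (by omega),
              ih _ (pv_sum_set_lt cnt i hc) _ _ _ rfl,
              List.filterMap_append, List.filterMap_map, List.append_assoc]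
          congr 2
          refine List.filterMap_congr ?_
          intro u _
          simp only [Function.comp_apply]
          exact (pvF_cons d tmp _ u).symm
      · simp [hlt]
  rw [pvCombRec, pvExts]
  rw [hloop lst.length 0 tmp _ (by omega)]
  simp only [List.filterMap_cons]
  have hF : pvF d tmp [] = if 0 < tmp.length then
      (d.find? (fun kv => kv.1 == String.ofList tmp)).map (fun kv => PySem.Int.toStr kv.2)
    else none := by
    simp only [pvF, List.append_nil]
    by_cases h : tmp.length = 0 <;> simp [h, Nat.pos_iff_ne_zero]
  by_cases ht : 0 < tmp.length
  · simp only [if_pos ht] at hF ⊢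
    cases hfind : d.find? (fun kv => kv.1 == String.ofList tmp) with
    | none => simp [hF, hfind]
    | some kv => simp [hF, hfind]
  · simp only [if_neg ht] at hF ⊢
    simp [hF]

-- building (lst, cnt) from the Counter items by appending
theorem pv_foldl_pair (l : List (Char × Int)) (a : List Char) (b : List Nat) :
    l.foldl (fun (p : List Char × List Nat) kv => (p.1 ++ [kv.1], p.2 ++ [kv.2.toNat])) (a, b)
      = (a ++ l.map (·.1), b ++ l.map (fun kv => kv.2.toNat)) := by
  induction l generalizing a b with
  | nil => simp
  | cons x t iht => simp [List.foldl_cons, iht]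

theorem pv_filterMap_split {α β : Type} (L : List α) (g : α → Option β) (q : α → Bool) (f : α → β)
    (h : ∀ u ∈ L, g u = if q u = true then some (f u) else none) :
    L.filterMap g = (L.filter q).map f := by
  induction L with
  | nil => rfl
  | cons x t iht =>
    rw [List.filterMap_cons, List.filter_cons]
    have hx := h x (by simp)
    by_cases hq : q x = true
    · simp only [hq, if_true] at hx ⊢
      rw [hx, List.map_cons, iht (fun u hu => h u (by simp [hu]))]
    · simp only [hq, if_false, Bool.false_eq_true] at hx ⊢
      rw [hx, iht (fun u hu => h u (by simp [hu]))]

theorem pv_find?_of_nodup (d : List (String × Int)) (hnd : (d.map Prod.fst).Nodup)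
    (kv : String × Int) (hkv : kv ∈ d) :
    d.find? (fun x => x.1 == kv.1) = some kv := by
  induction d with
  | nil => cases hkv
  | cons a t iht =>
    rw [List.map_cons, List.nodup_cons] at hnd
    rcases List.mem_cons.mp hkv with rfl | hkv'
    · simp
    · have hne : (a.1 == kv.1) = false := by
        simp only [beq_eq_false_iff_ne, ne_eq]
        intro h
        exact hnd.1 (h ▸ List.mem_map_of_mem hkv')
      rw [List.find?_cons, hne]
      exact iht hnd.2 hkv'

theorem pv_toList_ne_nil (s : String) (h : s ≠ "") : s.toList ≠ [] := by
  intro he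
  apply h
  have := congrArg String.ofList he
  simpa using this

-- the filter/value functions the two result lists reduce to
def pvQ (dict : List (String × Int)) (u : List Char) : Bool :=
  (!u.isEmpty) && (dict.any (fun kv => kv.1 == String.ofList u))

def pvPk (str1 : String) (k : String) : Bool :=
  (k != "") && ((PySem.Dict.counter k.toList).keys.all
    (fun c => decide ((PySem.Dict.counter k.toList).getD c 0
      ≤ (PySem.Dict.counter str1.toList).getD c 0)))

def pvVal (dict : List (String × Int)) (s : String) : String :=
  ((dict.find? (fun kv => kv.1 == s)).map (fun kv => PySem.Int.toStr kv.2)).getD ""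

theorem pv_ofList_injective : Function.Injective String.ofList := by
  intro a b h
  have := congrArg String.toList h
  simpa using this

theorem pvF_split (dict : List (String × Int)) (u : List Char) :
    pvF dict [] u = if pvQ dict u = true then some (pvVal dict (String.ofList u)) else none := by
  by_cases hu : u = []
  · subst hu
    simp [pvF, pvQ]
  · have hlen : ¬ ([] ++ u : List Char).length = 0 := by
      simpa using fun h => hu (List.eq_nil_of_length_eq_zero h)
    rw [pvF, if_neg hlen]
    simp only [List.nil_append]
    cases hfind : dict.find? (fun kv => kv.1 == String.ofList u) with
    | none =>
      have hq : pvQ dict u = false := by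
        have hall := List.find?_eq_none.mp hfind
        simp only [pvQ, Bool.and_eq_false_iff]
        right
        simp only [List.any_eq_false]
        exact fun kv hkv => hall kv hkv
      simp [hq]
    | some kv =>
      have hq : pvQ dict u = true := by
        simp only [pvQ, Bool.and_eq_true]
        refine ⟨by simp [hu], ?_⟩
        rw [List.any_eq_true]
        have hp : (kv.1 == String.ofList u) = true := by simpa using List.find?_some hfind
        exact ⟨kv, List.mem_of_find?_eq_some hfind, hp⟩
      simp [hq, pvVal, hfind]

-- membership in the enumeration, stated with plain character counts
theorem pv_mem_exts_count (S u : List Char) :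
    u ∈ pvExts (PySem.Set.ofList S) ((PySem.Set.ofList S).map (fun c => S.count c)) ↔
      ∀ c, u.count c ≤ S.count c := by
  rw [pv_mem_exts _ (PySem.Set.nodup_ofList S)]
  have hlen : ((PySem.Set.ofList S).map (fun c => S.count c)).length
      = (PySem.Set.ofList S : List Char).length := List.length_map ..
  constructor
  · rintro ⟨h1, h2⟩ c
    by_cases hc : c ∈ (PySem.Set.ofList S : List Char)
    · obtain ⟨i, hi, hci⟩ := List.mem_iff_getElem.mp hc
      have hgd : (PySem.Set.ofList S : List Char).getD i ' ' = c := by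
        rw [List.getD_eq_getElem?_getD, List.getElem?_eq_getElem hi, Option.getD_some, hci]
      have hcd : ((PySem.Set.ofList S).map (fun c => S.count c)).getD i 0 = S.count c := by
        rw [List.getD_eq_getElem?_getD, List.getElem?_map, List.getElem?_eq_getElem hi]
        simp [hci]
      have := h2 i hi
      rw [hgd, hcd] at this
      exact this
    · have hcu : c ∉ u := fun h => hc (h1 c h)
      simp [List.count_eq_zero.mpr hcu]
  · intro h
    refine ⟨?_, ?_⟩
    · intro c hc
      have h1 : 0 < u.count c := List.count_pos_iff.mpr hc
      have h2 : 0 < S.count c := lt_of_lt_of_le h1 (h c)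
      exact (PySem.Set.mem_ofList S c).mpr (List.count_pos_iff.mp h2)
    · intro i hi
      have hcd : ((PySem.Set.ofList S).map (fun c => S.count c)).getD i 0
          = S.count ((PySem.Set.ofList S : List Char).getD i ' ') := by
        rw [List.getD_eq_getElem?_getD, List.getElem?_map, List.getElem?_eq_getElem hi]
        simp [List.getD_eq_getElem?_getD, List.getElem?_eq_getElem hi]
      rw [hcd]
      exact h _

-- the key condition B tests, stated with plain character counts
theorem pv_pk_iff (str1 s : String) :
    pvPk str1 s = true ↔ s ≠ "" ∧ ∀ c, s.toList.count c ≤ str1.toList.count c := by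
  rw [pvPk, Bool.and_eq_true]
  constructor
  · rintro ⟨h1, h2⟩
    refine ⟨by simpa using h1, ?_⟩
    intro c
    by_cases hc : c ∈ s.toList
    · have hmem : c ∈ (PySem.Dict.counter s.toList).keys := by
        rw [PySem.Dict.keys_counter]
        exact (PySem.Set.mem_ofList _ c).mpr hc
      have := List.all_eq_true.mp h2 c hmem
      rw [decide_eq_true_iff, PySem.Dict.getD_counter, PySem.Dict.getD_counter] at this
      exact_mod_cast this
    · simp [List.count_eq_zero.mpr hc]
  · rintro ⟨h1, h2⟩
    refine ⟨by simpa using h1, ?_⟩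
    rw [List.all_eq_true]
    intro c _
    rw [decide_eq_true_iff, PySem.Dict.getD_counter, PySem.Dict.getD_counter]
    exact_mod_cast h2 c

-- ===== VERDICT (by name: the statement is the Claim_ definition above) =====
theorem LeetCode423_spec : Claim_equal_LeetCode423 := by
  intro dict str1 _ hpre
  unfold Spec_LeetCode423
  have hpre' : (dict.map Prod.fst).Nodup := hpre
  -- A's result list
  have hA : LeetCode423 dict str1 = PySem.Str.join ""
      (PySem.List.sorted ((pvExts (PySem.Set.ofList str1.toList)
        ((PySem.Set.ofList str1.toList).map (fun c => str1.toList.count c))).filterMap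
          (pvF dict [])) (fun s => s)) := by
    unfold LeetCode423
    simp only [PySem.Dict.items_counter, pv_foldl_pair, pv_combRec_eq, List.nil_append,
      List.map_map, Function.comp_def, Int.toNat_natCast, List.map_id']
  -- B's result list
  have hB : LeetCode423_alt dict str1 = PySem.Str.join ""
      (PySem.List.sorted ((dict.filter (fun kv => pvPk str1 kv.1)).map
        (fun kv => PySem.Int.toStr kv.2)) (fun s => s)) := by
    unfold LeetCode423_alt pvPk
    simp only [PySem.List.foldl_append_if, List.nil_append]
  rw [hA, hB]
  -- both are joins of sorted lists of the same multiset of value strings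
  have hperm : ((pvExts (PySem.Set.ofList str1.toList)
      ((PySem.Set.ofList str1.toList).map (fun c => str1.toList.count c))).filterMap
        (pvF dict [])).Perm
      ((dict.filter (fun kv => pvPk str1 kv.1)).map (fun kv => PySem.Int.toStr kv.2)) := by
    -- rewrite A's list as (keys).map pvVal
    rw [pv_filterMap_split _ _ (pvQ dict) (fun u => pvVal dict (String.ofList u))
        (fun u _ => pvF_split dict u)]
    -- rewrite B's list as (keys).map pvVal
    have hBlist : (dict.filter (fun kv => pvPk str1 kv.1)).map (fun kv => PySem.Int.toStr kv.2)
        = ((dict.filter (fun kv => pvPk str1 kv.1)).map Prod.fst).map (pvVal dict) := by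
      rw [List.map_map]
      apply List.map_congr_left
      intro kv hkv
      have hmem : kv ∈ dict := (List.mem_filter.mp hkv).1
      simp [Function.comp, pvVal, pv_find?_of_nodup dict hpre' kv hmem]
    rw [hBlist]
    have hmapped : ((pvExts (PySem.Set.ofList str1.toList)
        ((PySem.Set.ofList str1.toList).map (fun c => str1.toList.count c))).filter
          (pvQ dict)).map (fun u => pvVal dict (String.ofList u))
        = (((pvExts (PySem.Set.ofList str1.toList)
        ((PySem.Set.ofList str1.toList).map (fun c => str1.toList.count c))).filter
          (pvQ dict)).map String.ofList).map (pvVal dict) := by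
      rw [List.map_map]
      rfl
    rw [hmapped]
    apply List.Perm.map
    -- the two key lists are Nodup with the same members
    apply (List.perm_ext_iff_of_nodup ?_ ?_).mpr
    · intro s
      simp only [List.mem_map, List.mem_filter]
      constructor
      · rintro ⟨u, ⟨humem, huq⟩, rfl⟩
        have hcnt := (pv_mem_exts_count str1.toList u).mp humem
        simp only [pvQ, Bool.and_eq_true, List.any_eq_true] at huq
        obtain ⟨hne, kv, hkv, hbe⟩ := huq
        have hkey : kv.1 = String.ofList u := beq_iff_eq.mp hbe
        refine ⟨kv, ⟨hkv, ?_⟩, hkey⟩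
        rw [pv_pk_iff, hkey]
        refine ⟨?_, ?_⟩
        · intro h0
          have : u = [] := by
            have := congrArg String.toList h0
            simpa using this
          simp [this] at hne
        · intro c
          simpa using hcnt c
      · rintro ⟨kv, ⟨hkv, hpk⟩, rfl⟩
        obtain ⟨hne, hcnt⟩ := (pv_pk_iff str1 kv.1).mp hpk
        refine ⟨kv.1.toList, ⟨?_, ?_⟩, String.ofList_toList⟩
        · exact (pv_mem_exts_count str1.toList kv.1.toList).mpr hcnt
        · simp only [pvQ, Bool.and_eq_true, List.any_eq_true]
          refine ⟨?_, kv, hkv, ?_⟩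
          · simpa using pv_toList_ne_nil kv.1 hne
          · rw [String.ofList_toList]
            exact beq_self_eq_true _
    · exact List.Nodup.map pv_ofList_injective
        (List.Nodup.filter _ (pv_nodup_exts _ (PySem.Set.nodup_ofList _) _))
    · -- Nodup of B's key list: it is a sublist of dict's key list
      have : (dict.filter (fun kv => pvPk str1 kv.1)).map Prod.fst
          = (dict.map Prod.fst).filter (pvPk str1) := by
        rw [List.filter_map]
        rfl
      rw [this]
      exact List.Nodup.filter _ hpre'
  rw [PySem.List.sorted_eq_sorted_of_perm _ _ _ (fun a b h => h) hperm]
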